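-- pv_equiv track=rewrite | github.com/ldhldh07/Algorithm | 백준/Gold/2632. 피자판매/피자판매.py | get_sum_dict
-- ===== SOURCE A (Python) =====
-- from collections import defaultdict
--
-- def get_sum_dict(pizzas, size, selling_size):
--     sum_dict = defaultdict(int)
--     if sum(pizzas) <= selling_size:
--         sum_dict[sum(pizzas)] += 1
--
--     for length in range(1, size):
--         pizza_sum = sum(pizzas[:length])
--         if pizza_sum <= selling_size:
--             sum_dict[pizza_sum] += 1
--
--         for start in range(size-1):
--             pizza_sum = pizza_sum - pizzas[start] + pizzas[(start + length) % size]
--             if pizza_sum <= selling_size: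
--                 sum_dict[pizza_sum] += 1
--     return sum_dict
-- ===== SOURCE B (Python) =====
-- from collections import defaultdict
--
-- def get_sum_dict(pizzas, size, selling_size):
--     # prefix sums over the doubled (circular) list instead of A's sliding-window updates
--     out = defaultdict(int)
--     total = sum(pizzas)
--     if total <= selling_size:
--         out[total] += 1
--     arr = pizzas[:size] * 2
--     prefix = [0]
--     acc = 0
--     for x in arr:
--         acc += x
--         prefix.append(acc)
--     for length in range(1, size):
--         for start in range(size):
--             s = prefix[start + length] - prefix[start]
--             if s <= selling_size:
--                 out[s] += 1
--     return out
-- ===== Notes on version B (the rewrite author's own statement) =====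
-- stated objective: alternative
-- what changed: Replaces A's per-length sliding-window updates (pizza_sum - pizzas[start] + pizzas[(start+length)%size]) with a prefix-sum array over the doubled circular list, each window sum read off as prefix[start+length]-prefix[start].
import Mathlib
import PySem

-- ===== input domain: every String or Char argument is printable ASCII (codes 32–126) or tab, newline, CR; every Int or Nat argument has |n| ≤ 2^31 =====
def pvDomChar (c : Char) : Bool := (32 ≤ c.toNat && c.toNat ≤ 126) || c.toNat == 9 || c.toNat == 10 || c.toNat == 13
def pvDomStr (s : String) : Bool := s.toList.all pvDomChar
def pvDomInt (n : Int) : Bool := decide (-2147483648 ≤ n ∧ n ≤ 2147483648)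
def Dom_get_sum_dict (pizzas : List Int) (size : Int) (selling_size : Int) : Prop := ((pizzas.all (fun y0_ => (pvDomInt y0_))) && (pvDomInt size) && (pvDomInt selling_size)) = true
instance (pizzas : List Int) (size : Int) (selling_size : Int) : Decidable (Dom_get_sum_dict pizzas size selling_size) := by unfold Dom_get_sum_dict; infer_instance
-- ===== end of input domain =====

-- B replaces A's sliding-window updates by prefix sums over the doubled circular list (alternative decomposition, same cost).


-- ===== PORT A =====
def get_sum_dict (pizzas : List Int) (size : Int) (selling_size : Int) : List (Int × Int) :=
  let sum_dict : PySem.Dict Int Int := PySem.Dict.empty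
  let sum_dict := if pizzas.sum ≤ selling_size then sum_dict.modify pizzas.sum 0 (· + 1) else sum_dict
  let sum_dict := (PySem.List.pyRange 1 size 1).foldl (fun sum_dict length =>
    let pizza_sum := (PySem.List.slice pizzas none (some length)).sum
    let sum_dict := if pizza_sum ≤ selling_size then sum_dict.modify pizza_sum 0 (· + 1) else sum_dict
    ((PySem.List.pyRange 0 (size - 1) 1).foldl (fun st start =>
        let pizza_sum := st.1 - PySem.List.pyGetD pizzas start 0 +
          PySem.List.pyGetD pizzas (PySem.Int.mod (start + length) size) 0
        (pizza_sum, if pizza_sum ≤ selling_size then st.2.modify pizza_sum 0 (· + 1) else st.2))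
      (pizza_sum, sum_dict)).2) sum_dict
  sum_dict.items

-- ===== PORT B =====
def get_sum_dict_alt (pizzas : List Int) (size : Int) (selling_size : Int) : List (Int × Int) :=
  let out : PySem.Dict Int Int := PySem.Dict.empty
  let total := pizzas.sum
  let out := if total ≤ selling_size then out.modify total 0 (· + 1) else out
  let arr := PySem.List.slice pizzas none (some size) ++ PySem.List.slice pizzas none (some size)
  let pre := (arr.foldl (fun (st : Int × List Int) x => (st.1 + x, st.2 ++ [st.1 + x])) (0, [0])).2
  let out := (PySem.List.pyRange 1 size 1).foldl (fun out length =>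
    (PySem.List.pyRange 0 size 1).foldl (fun out start =>
      let s := PySem.List.pyGetD pre (start + length) 0 - PySem.List.pyGetD pre start 0
      if s ≤ selling_size then out.modify s 0 (· + 1) else out) out) out
  out.items

-- ===== PRECONDITION & SPEC =====
-- Pre_ excludes exactly the inputs where A raises IndexError: size ≥ 2 with fewer than size pizzas.
def Pre_get_sum_dict (pizzas : List Int) (size : Int) (selling_size : Int) : Prop :=
  size ≤ (pizzas.length : Int) ∨ size ≤ 1
instance (pizzas : List Int) (size : Int) (selling_size : Int) : Decidable (Pre_get_sum_dict pizzas size selling_size) := by unfold Pre_get_sum_dict; infer_instance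
def pvWitness_get_sum_dict : List Int × Int × Int := ([1, 2, 3], 3, 3)

def Spec_get_sum_dict (pizzas : List Int) (size : Int) (selling_size : Int) (out : List (Int × Int)) : Prop := out = get_sum_dict_alt pizzas size selling_size
instance (pizzas : List Int) (size : Int) (selling_size : Int) (out : List (Int × Int)) : Decidable (Spec_get_sum_dict pizzas size selling_size out) := by unfold Spec_get_sum_dict; infer_instance

-- ===== CLAIM (what is proved, stated in full; the proofs are below) =====
def Claim_equal_get_sum_dict : Prop := ∀ (pizzas : List Int) (size : Int) (selling_size : Int), Dom_get_sum_dict pizzas size selling_size → Pre_get_sum_dict pizzas size selling_size → Spec_get_sum_dict pizzas size selling_size (get_sum_dict pizzas size selling_size)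

-- ===== LEMMAS AND PROOFS =====

-- running sums of l starting from acc (the values appended to B's prefix list)
def pvScan : List Int → Int → List Int
  | [], _ => []
  | x :: t, acc => (acc + x) :: pvScan t (acc + x)

-- the values taken by A's sliding accumulator along an index list
def pvChain (f : Int → Int → Int) : Int → List Int → List Int
  | _, [] => []
  | s, i :: t => f s i :: pvChain f (f s i) t

-- B's prefix fold produces the appended running sums
theorem pvScan_foldl (l : List Int) : ∀ (acc : Int) (P : List Int),
    (l.foldl (fun (st : Int × List Int) x => (st.1 + x, st.2 ++ [st.1 + x])) (acc, P)).2
      = P ++ pvScan l acc := by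
  induction l with
  | nil => intro acc P; simp [pvScan]
  | cons x t ih => intro acc P; simp [pvScan, List.foldl_cons, ih, List.append_assoc]

theorem pvScan_getElem (l : List Int) : ∀ (acc : Int) (j : Nat), j < l.length + 1 →
    (acc :: pvScan l acc)[j]? = some (acc + (l.take j).sum) := by
  induction l with
  | nil =>
    intro acc j h
    have : j = 0 := by simpa using h
    subst this; simp
  | cons x t ih =>
    intro acc j h
    cases j with
    | zero => simp
    | succ j =>
      have := ih (acc + x) j (by simpa using h)
      simpa [pvScan, List.take_succ_cons, add_assoc] using this

-- factor the inner fold of A: the dict is the fold of the bump over the chain of values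
theorem pvFoldl_pair_snd (g : PySem.Dict Int Int → Int → PySem.Dict Int Int)
    (f : Int → Int → Int) (idx : List Int) : ∀ (s : Int) (d : PySem.Dict Int Int),
    (idx.foldl (fun st i => ((f st.1 i), g st.2 (f st.1 i))) (s, d)).2
      = (pvChain f s idx).foldl g d := by
  induction idx with
  | nil => intro s d; simp [pvChain]
  | cons i t ih => intro s d; simp [pvChain, List.foldl_cons, ih]

-- sliding chain = window values, generic step lemma
theorem pvChain_window (f : Int → Int → Int) (v : Int → Int) (b : Int) :
    ∀ (fuel : Nat) (k : Int), k + fuel = b →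
      (∀ j, k ≤ j → j < b → f (v j) j = v (j + 1)) →
      v k :: pvChain f (v k) (PySem.List.pyRange k b 1)
        = (PySem.List.pyRange k (b + 1) 1).map v := by
  intro fuel
  induction fuel with
  | zero =>
    intro k hk _
    have hb : b = k := by omega
    subst hb
    rw [PySem.List.pyRange_one_eq_nil (by omega), PySem.List.pyRange_one_cons (by omega),
      PySem.List.pyRange_one_eq_nil (by omega)]
    simp [pvChain]
  | succ m ih =>
    intro k hk hstep
    have hkb : k < b := by omega
    rw [PySem.List.pyRange_one_cons hkb, PySem.List.pyRange_one_cons (by omega : k < b + 1)]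
    have h1 : f (v k) k = v (k + 1) := hstep k le_rfl hkb
    simp only [pvChain, h1, List.map_cons]
    congr 1
    exact ih (k + 1) (by omega) (fun j hj hjb => hstep j (by omega) hjb)

theorem pvScan_length (l : List Int) : ∀ acc, (pvScan l acc).length = l.length := by
  induction l with
  | nil => intro acc; rfl
  | cons x t ih => intro acc; simp [pvScan, ih]

-- the doubled circular list (proof-only name for B's arr)
def pvArr (pizzas : List Int) (size : Int) : List Int :=
  pizzas.take size.toNat ++ pizzas.take size.toNat

-- prefix sums of the doubled list
def pvS (pizzas : List Int) (size : Int) (j : Nat) : Int := ((pvArr pizzas size).take j).sum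

theorem pvArr_length (pizzas : List Int) (size : Int) (hle : size ≤ (pizzas.length : Int)) :
    (pvArr pizzas size).length = 2 * size.toNat := by
  simp [pvArr]; omega

theorem pvArr_getD (pizzas : List Int) (size : Int) (hle : size ≤ (pizzas.length : Int))
    (j : Nat) (hj : j < 2 * size.toNat) :
    (pvArr pizzas size).getD j 0 =
      if j < size.toNat then pizzas.getD j 0 else pizzas.getD (j - size.toNat) 0 := by
  have hlen : (pizzas.take size.toNat).length = size.toNat := by simp; omega
  simp only [pvArr, List.getD_eq_getElem?_getD, List.getElem?_append, hlen, List.getElem?_take]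
  split_ifs with h1 h2 h3 <;> first | rfl | omega

theorem pvS_succ (pizzas : List Int) (size : Int) (j : Nat)
    (hj : j < (pvArr pizzas size).length) :
    pvS pizzas size (j + 1) = pvS pizzas size j + (pvArr pizzas size).getD j 0 := by
  unfold pvS
  rw [List.take_add_one, List.sum_append, List.getD_eq_getElem?_getD,
    List.getElem?_eq_getElem hj]
  simp

theorem pvS_take (pizzas : List Int) (size L : Int) (hL : L ≤ size)
    (hle : size ≤ (pizzas.length : Int)) :
    pvS pizzas size L.toNat = (pizzas.take L.toNat).sum := by
  unfold pvS pvArr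
  rw [List.take_append_of_le_length (by simp; omega), List.take_take]
  congr 2
  omega

theorem pvPre_getD (pizzas : List Int) (size : Int) (hle : size ≤ (pizzas.length : Int))
    (t : Int) (h0t : 0 ≤ t) (ht : t ≤ 2 * size) :
    PySem.List.pyGetD (0 :: pvScan (pvArr pizzas size) 0) t 0 = pvS pizzas size t.toNat := by
  have hlen := pvArr_length pizzas size hle
  have hsc := pvScan_length (pvArr pizzas size) 0
  have h1 : t < (((0 : Int) :: pvScan (pvArr pizzas size) 0).length : Int) := by
    simp [hsc, hlen]; omega
  rw [PySem.List.pyGetD_eq_getElem _ _ h0t h1]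
  have h2 := pvScan_getElem (pvArr pizzas size) 0 t.toNat (by omega)
  have h3 : ((0 : Int) :: pvScan (pvArr pizzas size) 0)[t.toNat]? =
      some (((0 : Int) :: pvScan (pvArr pizzas size) 0)[t.toNat]'(by simp [hsc]; omega)) :=
    List.getElem?_eq_getElem _
  rw [h3] at h2
  simpa [pvS] using (Option.some_inj.mp h2)

-- A's sliding update applied to a window sum gives the next window sum
theorem pvStep (pizzas : List Int) (size L j : Int) (hle : size ≤ (pizzas.length : Int))
    (hL : 1 ≤ L) (hLs : L < size) (hj0 : 0 ≤ j) (hj : j < size - 1) :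
    pvS pizzas size (j + L).toNat - pvS pizzas size j.toNat - PySem.List.pyGetD pizzas j 0
      + PySem.List.pyGetD pizzas (PySem.Int.mod (j + L) size) 0
    = pvS pizzas size (j + 1 + L).toNat - pvS pizzas size (j + 1).toNat := by
  have hlen := pvArr_length pizzas size hle
  have e1 : (j + 1).toNat = j.toNat + 1 := by omega
  have e2 : (j + 1 + L).toNat = (j + L).toNat + 1 := by omega
  rw [e1, e2, pvS_succ pizzas size j.toNat (by omega), pvS_succ pizzas size (j + L).toNat (by omega)]
  have ha1 : (pvArr pizzas size).getD j.toNat 0 = PySem.List.pyGetD pizzas j 0 := by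
    rw [pvArr_getD pizzas size hle j.toNat (by omega), if_pos (by omega),
      PySem.List.pyGetD_eq_getElem pizzas 0 hj0 (by omega), List.getD_eq_getElem?_getD,
      List.getElem?_eq_getElem (by omega : j.toNat < pizzas.length)]
    rfl
  have hmod : PySem.Int.mod (j + L) size = if j + L < size then j + L else j + L - size := by
    rw [PySem.Int.mod_eq_emod_of_pos (by omega)]
    split_ifs with hcase
    · exact Int.emod_eq_of_lt (by omega) hcase
    · rw [← Int.sub_emod_right (j + L) size]
      exact Int.emod_eq_of_lt (by omega) (by omega)
  have ha2 : (pvArr pizzas size).getD (j + L).toNat 0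
      = PySem.List.pyGetD pizzas (PySem.Int.mod (j + L) size) 0 := by
    rw [pvArr_getD pizzas size hle (j + L).toNat (by omega), hmod]
    by_cases hcase : j + L < size
    · rw [if_pos hcase, if_pos (by omega),
        PySem.List.pyGetD_eq_getElem pizzas 0 (by omega) (by omega), List.getD_eq_getElem?_getD,
        List.getElem?_eq_getElem (by omega : (j + L).toNat < pizzas.length)]
      rfl
    · rw [if_neg hcase, if_neg (by omega)]
      have hidx : (j + L).toNat - size.toNat = (j + L - size).toNat := by omega
      rw [hidx, PySem.List.pyGetD_eq_getElem pizzas 0 (by omega) (by omega),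
        List.getD_eq_getElem?_getD,
        List.getElem?_eq_getElem (by omega : (j + L - size).toNat < pizzas.length)]
      rfl
  rw [← ha1, ← ha2]
  ring

-- one iteration of the outer loop: A's inner sliding loop equals B's prefix-difference loop
theorem pvBody (pizzas : List Int) (size selling_size : Int)
    (hle : size ≤ (pizzas.length : Int)) (h2 : 2 ≤ size)
    (L : Int) (hL : 1 ≤ L) (hLs : L < size) (d : PySem.Dict Int Int) :
    (let pizza_sum := (PySem.List.slice pizzas none (some L)).sum
     let d1 := if pizza_sum ≤ selling_size then d.modify pizza_sum 0 (· + 1) else d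
     ((PySem.List.pyRange 0 (size - 1) 1).foldl (fun st start =>
         let ps := st.1 - PySem.List.pyGetD pizzas start 0 +
           PySem.List.pyGetD pizzas (PySem.Int.mod (start + L) size) 0
         (ps, if ps ≤ selling_size then st.2.modify ps 0 (· + 1) else st.2))
       (pizza_sum, d1)).2)
    = (PySem.List.pyRange 0 size 1).foldl (fun out start =>
        let s := PySem.List.pyGetD (0 :: pvScan (pvArr pizzas size) 0) (start + L) 0 -
          PySem.List.pyGetD (0 :: pvScan (pvArr pizzas size) 0) start 0
        if s ≤ selling_size then out.modify s 0 (· + 1) else out) d := by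
  have hv0 : (PySem.List.slice pizzas none (some L)).sum
      = PySem.List.pyGetD (0 :: pvScan (pvArr pizzas size) 0) (0 + L) 0 -
        PySem.List.pyGetD (0 :: pvScan (pvArr pizzas size) 0) 0 0 := by
    rw [PySem.List.slice_to pizzas (by omega : (0:Int) ≤ L),
      pvPre_getD pizzas size hle (0 + L) (by omega) (by omega),
      pvPre_getD pizzas size hle 0 (by omega) (by omega)]
    have : ((0 : Int) + L).toNat = L.toNat := by omega
    rw [this, pvS_take pizzas size L (by omega) hle]
    simp [pvS]
  set v : Int → Int := fun t =>
    PySem.List.pyGetD (0 :: pvScan (pvArr pizzas size) 0) (t + L) 0 -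
      PySem.List.pyGetD (0 :: pvScan (pvArr pizzas size) 0) t 0 with hv
  set f : Int → Int → Int := fun s start => s - PySem.List.pyGetD pizzas start 0 +
      PySem.List.pyGetD pizzas (PySem.Int.mod (start + L) size) 0 with hf
  set g : PySem.Dict Int Int → Int → PySem.Dict Int Int := fun d s =>
      if s ≤ selling_size then d.modify s 0 (· + 1) else d with hg
  have hstep : ∀ j, 0 ≤ j → j < size - 1 → f (v j) j = v (j + 1) := by
    intro j hj0 hj
    simp only [hf, hv]
    rw [pvPre_getD pizzas size hle (j + L) (by omega) (by omega),
      pvPre_getD pizzas size hle j (by omega) (by omega),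
      pvPre_getD pizzas size hle (j + 1 + L) (by omega) (by omega),
      pvPre_getD pizzas size hle (j + 1) (by omega) (by omega)]
    exact pvStep pizzas size L j hle hL hLs hj0 hj
  have hwin := pvChain_window f v (size - 1) (size - 1).toNat 0 (by omega) hstep
  have hsz : size - 1 + 1 = size := by omega
  rw [hsz] at hwin
  calc (let pizza_sum := (PySem.List.slice pizzas none (some L)).sum
        let d1 := if pizza_sum ≤ selling_size then d.modify pizza_sum 0 (· + 1) else d
        ((PySem.List.pyRange 0 (size - 1) 1).foldl (fun st start =>
            let ps := st.1 - PySem.List.pyGetD pizzas start 0 +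
              PySem.List.pyGetD pizzas (PySem.Int.mod (start + L) size) 0
            (ps, if ps ≤ selling_size then st.2.modify ps 0 (· + 1) else st.2))
          (pizza_sum, d1)).2)
      = (pvChain f (v 0) (PySem.List.pyRange 0 (size - 1) 1)).foldl g (g d (v 0)) := by
        show ((PySem.List.pyRange 0 (size - 1) 1).foldl
            (fun st start => (f st.1 start, g st.2 (f st.1 start)))
            ((PySem.List.slice pizzas none (some L)).sum,
              g d ((PySem.List.slice pizzas none (some L)).sum))).2
          = (pvChain f (v 0) (PySem.List.pyRange 0 (size - 1) 1)).foldl g (g d (v 0))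
        rw [pvFoldl_pair_snd g f, hv0]
    _ = ((v 0 :: pvChain f (v 0) (PySem.List.pyRange 0 (size - 1) 1))).foldl g d := rfl
    _ = ((PySem.List.pyRange 0 size 1).map v).foldl g d := by rw [hwin]
    _ = (PySem.List.pyRange 0 size 1).foldl (fun out start =>
          let s := PySem.List.pyGetD (0 :: pvScan (pvArr pizzas size) 0) (start + L) 0 -
            PySem.List.pyGetD (0 :: pvScan (pvArr pizzas size) 0) start 0
          if s ≤ selling_size then out.modify s 0 (· + 1) else out) d := List.foldl_map

theorem get_sum_dict_eq_alt (pizzas : List Int) (size selling_size : Int)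
    (h : Pre_get_sum_dict pizzas size selling_size) :
    get_sum_dict pizzas size selling_size = get_sum_dict_alt pizzas size selling_size := by
  by_cases hs : size ≤ 1
  · simp only [get_sum_dict, get_sum_dict_alt,
      PySem.List.pyRange_one_eq_nil (show size ≤ 1 from hs), List.foldl_nil]
  · have hle : size ≤ (pizzas.length : Int) := by
      rcases h with h | h
      · exact h
      · omega
    simp only [get_sum_dict, get_sum_dict_alt,
      PySem.List.slice_to pizzas (show (0:Int) ≤ size by omega), pvScan_foldl,
      List.singleton_append]
    refine congrArg PySem.Dict.items (PySem.List.foldl_congr_mem _ _ _ _ ?_)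
    intro d L hmem
    rw [PySem.List.mem_pyRange_one] at hmem
    exact pvBody pizzas size selling_size hle (by omega) L hmem.1 hmem.2 d

-- ===== VERDICT (by name: the statement is the Claim_ definition above) =====
theorem get_sum_dict_spec : Claim_equal_get_sum_dict := by
  intro pizzas size selling_size _ hpre
  exact get_sum_dict_eq_alt pizzas size selling_size hpre
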